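-- pv_equiv track=rewrite | github.com/kelseyygroom/Columns-Game | project5_model.py | fill_holes
-- ===== SOURCE A (Python) =====
-- def find_bottom_empty(board: [list], column: int) -> int or None:
--     '''
--     Finds the bottommost empty row in a given column, so that any holes
--     specified in the starting board can be filled.
--     '''
--
--     for i in range(len(board)-1, -1, -1):
--         if board[i][column] == ' ':
--             return i
--
--     return None  # if the whole column is full, bottom empty = None
--
-- def fill_holes(board: [list]) -> [list]:
--     '''
--     If any holes are specified in the contents of the starting board, this
--     function fills all holes and returns the updated board.
--     '''
--
--     # find the bottom of each column and drop all jewels to the bottom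
--     for x in range(len(board)-1, -1, -1):
--         for i, v in enumerate(board[x]):
--             if v != ' ':
--                 bottom = find_bottom_empty(board, i)
--                 if bottom != None and bottom >= x:
--                     board[bottom][i] = board[x][i]
--                     board[x][i] = ' '
--
--     return board
-- ===== SOURCE B (Python) =====
-- def fill_holes(board: [list]) -> [list]:
--     # Per-column single pass: gather the non-space values top-to-bottom and
--     # place them at the bottom of the column, spaces on top; rebuild the board.
--     # (Return-value equivalence only: A mutates board in place, B builds a new board.)
--     rows = len(board)
--     width = len(board[0]) if board else 0
--     packed = []
--     for c in range(width):
--         vals = [row[c] for row in board if row[c] != ' ']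
--         packed.append([' '] * (rows - len(vals)) + vals)
--     return [[packed[c][r] for c in range(width)] for r in range(rows)]
-- ===== Notes on version B (the rewrite author's own statement) =====
-- stated objective: faster
-- what changed: A repeatedly rescans each column bottom-up (find_bottom_empty) for every non-space cell while mutating the board in place; B makes one pass per column, collecting the non-space values in order and stacking them at the bottom under leading spaces, then rebuilds the board (return value only: A mutates its argument, B does not).
-- outside the precondition, e.g. on fill_holes([[' '], [' ', ' ']]): A returns [[' '], [' ', ' ']], B returns [[' '], [' ']]
import Mathlib
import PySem

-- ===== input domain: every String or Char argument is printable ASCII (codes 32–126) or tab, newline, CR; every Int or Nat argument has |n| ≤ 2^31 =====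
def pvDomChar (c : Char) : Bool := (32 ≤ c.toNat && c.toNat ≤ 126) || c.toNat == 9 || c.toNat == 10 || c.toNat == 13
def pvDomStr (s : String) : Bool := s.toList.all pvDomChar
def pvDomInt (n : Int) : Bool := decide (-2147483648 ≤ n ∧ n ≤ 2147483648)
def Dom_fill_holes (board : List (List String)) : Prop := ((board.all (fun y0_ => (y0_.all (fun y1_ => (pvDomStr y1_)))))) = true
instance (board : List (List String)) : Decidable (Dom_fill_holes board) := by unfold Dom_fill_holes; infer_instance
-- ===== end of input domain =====

-- B replaces A's in-place bottom-up hole search (a full column scan per non-space cell)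
-- by one pass per column that stacks the non-space values at the bottom: objective faster.
-- Return-value equivalence only: the Python A mutates `board` in place, B builds a new board.

-- ===== PORT A =====
-- board[r][c] read; exact while r,c are in range (the loops below only produce in-range
-- indices on Pre_-rectangular boards, where Python A raises on no access)
def pvCellA (b : List (List String)) (r c : Nat) : String := (b.getD r []).getD c " "
-- board[r][c] = v
def pvSetA (b : List (List String)) (r c : Nat) (v : String) : List (List String) :=
  b.set r ((b.getD r []).set c v)

-- for i in range(len(board)-1,-1,-1): if board[i][column]==' ': return i  / return None
def find_bottom_empty (board : List (List String)) (column : Nat) : Option Nat :=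
  ((List.range board.length).reverse).find? (fun i => pvCellA board i column == " ")

def fill_holes (board : List (List String)) : List (List String) :=
  ((List.range board.length).reverse).foldl (fun b x =>
    -- enumerate(board[x]) is lazy: each (i, v) is read from the live row at its turn
    (List.range ((b.getD x []).length)).foldl (fun b2 i =>
      let v := pvCellA b2 x i
      if v ≠ " " then
        match find_bottom_empty b2 i with
        | some bottom => if x ≤ bottom then pvSetA (pvSetA b2 bottom i v) x i " " else b2
        | none => b2
      else b2) b) board

-- ===== PORT B =====
def fill_holes_alt (board : List (List String)) : List (List String) :=
  let rows := board.length
  let width := (board.headD []).length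
  let packed := (List.range width).map (fun c =>
    let vals := (board.map (fun row => row.getD c " ")).filter (fun v => v ≠ " ")
    List.replicate (rows - vals.length) " " ++ vals)
  (List.range rows).map (fun r =>
    (List.range width).map (fun c => (packed.getD c []).getD r " "))

-- ===== PRECONDITION & SPEC =====
-- Pre_ excludes ragged boards (rows of unequal length): there Python A raises IndexError on
-- most contents, and the cases where it happens to return depend on the bottom-up scan
-- accidentally stopping before the short row — an artefact, not the function's purpose.
def Pre_fill_holes (board : List (List String)) : Prop :=
  ∀ row ∈ board, row.length = (board.headD []).length
instance (board : List (List String)) : Decidable (Pre_fill_holes board) := by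
  unfold Pre_fill_holes; infer_instance

def pvWitness_fill_holes : List (List String) := [["a", " "], [" ", "b"]]

def Spec_fill_holes (board : List (List String)) (out : List (List String)) : Prop := out = fill_holes_alt board
instance (board : List (List String)) (out : List (List String)) : Decidable (Spec_fill_holes board out) := by unfold Spec_fill_holes; infer_instance

-- ===== CLAIM (what is proved, stated in full; the proofs are below) =====
def Claim_equal_fill_holes : Prop := ∀ (board : List (List String)), Dom_fill_holes board → Pre_fill_holes board → Spec_fill_holes board (fill_holes board)

-- ===== LEMMAS AND PROOFS =====

-- column c of the board, as the list board[0][c], board[1][c], …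
def pvColOf (b : List (List String)) (c : Nat) : List String :=
  b.map (fun row => row.getD c " ")

-- find_bottom_empty, expressed on a single column
def pvBottomCol (col : List String) : Option Nat :=
  ((List.range col.length).reverse).find? (fun i => col.getD i " " == " ")

-- the effect of one inner-loop iteration of A on the one column it touches
def pvStepCol (x : Nat) (col : List String) : List String :=
  let v := col.getD x " "
  if v ≠ " " then
    match pvBottomCol col with
    | some bottom => if x ≤ bottom then (col.set bottom v).set x " " else col
    | none => col
  else col

-- rectangular n×w shape
def pvShape (n w : Nat) (b : List (List String)) : Prop :=
  b.length = n ∧ ∀ i < n, (b.getD i []).length = w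

theorem pvCell_colOf (b : List (List String)) (r c : Nat) :
    pvCellA b r c = (pvColOf b c).getD r " " := by
  simp only [pvCellA, pvColOf, List.getD_eq_getElem?_getD, List.getElem?_map]
  cases h : b[r]? <;> simp [h, List.getD_eq_getElem?_getD]

theorem pvShape_set (n w : Nat) (b : List (List String)) (r c : Nat) (v : String)
    (h : pvShape n w b) : pvShape n w (pvSetA b r c v) := by
  obtain ⟨hl, hrow⟩ := h
  refine ⟨by simp [pvSetA, hl], ?_⟩
  intro i hi
  simp only [pvSetA, List.getD_eq_getElem?_getD, List.getElem?_set]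
  split_ifs with h1 h2
  · subst h1
    have := hrow r hi
    simpa [List.getD_eq_getElem?_getD] using this
  · simp [hl] at h2; omega
  · exact hrow i hi ▸ rfl

theorem pvColOf_set (b : List (List String)) (r c : Nat) (v : String)
    (hr : r < b.length) (hc : c < (b.getD r []).length) (c' : Nat) :
    pvColOf (pvSetA b r c v) c' = if c' = c then (pvColOf b c').set r v else pvColOf b c' := by
  apply List.ext_getElem?
  intro i
  by_cases hcc : c' = c <;>
    simp only [pvColOf, pvSetA, hcc, if_pos, if_neg, List.getElem?_map, List.getElem?_set,
      List.length_map, ite_true, ite_false]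
  · by_cases hri : r = i
    · subst hri
      have hcl : c < b[r].length := by
        simpa [List.getD_eq_getElem?_getD, List.getElem?_eq_getElem hr] using hc
      simp [hr, hcl, List.getD_eq_getElem?_getD, List.getElem?_eq_getElem hr]
    · simp [hri]
  · by_cases hri : r = i
    · subst hri
      simp [hr, List.getD_eq_getElem?_getD, List.getElem?_set, hcc]
      cases h : b[r]? <;> simp [List.getD_eq_getElem?_getD, h, List.getElem?_set, Ne.symm hcc]
    · simp [hri]

theorem pvFind_eq (b : List (List String)) (c : Nat) :
    find_bottom_empty b c = pvBottomCol (pvColOf b c) := by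
  unfold find_bottom_empty pvBottomCol
  rw [show (pvColOf b c).length = b.length from by simp [pvColOf]]
  congr 1
  funext i
  rw [pvCell_colOf]

theorem pvBottom_lt (col : List String) (bt : Nat) (h : pvBottomCol col = some bt) :
    bt < col.length ∧ col.getD bt " " = " " := by
  unfold pvBottomCol at h
  have hm := List.mem_of_find?_eq_some h
  have hp := List.find?_some h
  simp at hm hp
  exact ⟨hm, hp⟩

-- find? over the reversed range finds the greatest index satisfying the predicate
theorem pvFind_rev (len j : Nat) (p : Nat → Bool) (hj : j < len) (hpj : p j = true)
    (habove : ∀ r, j < r → r < len → p r = false) :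
    ((List.range len).reverse).find? p = some j := by
  induction len with
  | zero => omega
  | succ t ih =>
    rw [List.range_succ, List.reverse_append]
    simp only [List.reverse_singleton, List.singleton_append, List.find?_cons]
    by_cases hjt : j = t
    · subst hjt; simp [hpj]
    · have ht : p t = false := habove t (by omega) (by omega)
      simp only [ht]
      exact ih (by omega) (fun r h1 h2 => habove r h1 (by omega))

-- one step of A at row m preserves length and multiset of values, and keeps the suffix packed
theorem pvStep_packed (m : Nat) (col : List String) (s : Nat) (vs : List String)
    (hdrop : col.drop (m+1) = List.replicate s " " ++ vs) (hvs : ∀ v ∈ vs, v ≠ " ") :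
    (pvStepCol m col).length = col.length ∧
    (pvStepCol m col).filter (fun v => v ≠ " ") = col.filter (fun v => v ≠ " ") ∧
    ∃ s' vs', (pvStepCol m col).drop m = List.replicate s' " " ++ vs' ∧ ∀ v ∈ vs', v ≠ " " := by
  by_cases hml : m < col.length
  case neg =>
    -- row m does not exist: getD gives the default " ", A does nothing
    have hv : col.getD m " " = " " := by
      simp [List.getD_eq_getElem?_getD, List.getElem?_eq_none (by omega : col.length ≤ m)]
    have hstep : pvStepCol m col = col := by
      simp [pvStepCol, hv, -List.getD_eq_getElem?_getD]
    exact ⟨by rw [hstep], by rw [hstep], 0, [], by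
      simp [hstep, List.drop_eq_nil_of_le (by omega : col.length ≤ m)], by simp⟩
  case pos =>
  have hlen : col.length = m + 1 + (s + vs.length) := by
    have := List.length_drop (i := m+1) (l := col)
    rw [hdrop] at this; simp at this; omega
  have hdm : col.drop m = col[m] :: (List.replicate s " " ++ vs) := by
    rw [List.drop_eq_getElem_cons hml, hdrop]
  by_cases hv : col[m] = " "
  case pos =>
    have hgd : col.getD m " " = " " := by
      simp [List.getD_eq_getElem?_getD, List.getElem?_eq_getElem hml, hv]
    have hstep : pvStepCol m col = col := by
      simp [pvStepCol, hgd, -List.getD_eq_getElem?_getD]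
    refine ⟨by rw [hstep], by rw [hstep], s+1, vs, ?_, hvs⟩
    rw [hstep, hdm, hv]
    simp [List.replicate_succ]
  case neg =>
  have hgd : col.getD m " " = col[m] := by
    simp [List.getD_eq_getElem?_getD, List.getElem?_eq_getElem hml]
  -- value of getD at an index in the packed suffix
  have hsuf : ∀ r, m < r → r < col.length →
      col.getD r " " = (List.replicate s " " ++ vs).getD (r - (m+1)) " " := by
    intro r h1 h2
    have hr : (m+1) + (r - (m+1)) = r := by omega
    rw [List.getD_eq_getElem?_getD, List.getD_eq_getElem?_getD, ← hdrop,
      List.getElem?_drop, hr]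
  cases hs : s with
  | zero =>
    -- no hole below: the bottommost empty cell (if any) is above row m, A does nothing
    subst hs
    simp only [List.replicate_zero, List.nil_append] at hdrop hdm
    simp only [List.replicate_zero, List.nil_append] at hsuf
    have hstep : pvStepCol m col = col := by
      unfold pvStepCol
      cases hb : pvBottomCol col with
      | none => simp [hgd, hv, -List.getD_eq_getElem?_getD]
      | some bt =>
        obtain ⟨hbl, hbe⟩ := pvBottom_lt col bt hb
        have hbtm : bt < m := by
          rcases Nat.lt_trichotomy bt m with h | h | h
          · exact h
          · exfalso; rw [h, hgd] at hbe; exact hv hbe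
          · exfalso
            rw [hsuf bt h hbl] at hbe
            have hlt : bt - (m+1) < vs.length := by omega
            rw [List.getD_eq_getElem?_getD, List.getElem?_eq_getElem hlt] at hbe
            exact hvs _ (List.getElem_mem hlt) hbe
        simp [hgd, hv, Nat.not_le.mpr hbtm, -List.getD_eq_getElem?_getD]
    refine ⟨by rw [hstep], by rw [hstep], 0, col[m] :: vs, ?_, ?_⟩
    · rw [hstep, hdm]; simp
    · intro v hvmem
      rcases List.mem_cons.mp hvmem with h | h
      · subst h; exact hv
      · exact hvs v h
  | succ t =>
    subst hs
    -- the bottommost empty cell is at m + (t+1): A moves col[m] there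
    have hbot : pvBottomCol col = some (m + (t+1)) := by
      unfold pvBottomCol
      apply pvFind_rev
      · omega
      · rw [hsuf (m + (t+1)) (by omega) (by omega)]
        have hidx : m + (t+1) - (m+1) = t := by omega
        rw [hidx]
        simp [List.getD_eq_getElem?_getD, List.getElem?_append,
          List.getElem?_eq_getElem (by simp : t < (List.replicate (t+1) " ").length),
          List.getElem_replicate]
      · intro r h1 h2
        rw [hsuf r (by omega) h2]
        have hge : t + 1 ≤ r - (m+1) := by omega
        have hlt : r - (m+1) - (t+1) < vs.length := by omega
        rw [List.getD_eq_getElem?_getD, List.getElem?_append_right (by simpa using hge)]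
        simp only [List.length_replicate]
        rw [List.getElem?_eq_getElem hlt]
        simp only [Option.getD_some, beq_eq_false_iff_ne, ne_eq]
        exact hvs _ (List.getElem_mem hlt)
    have hstep : pvStepCol m col = (col.set (m + (t+1)) col[m]).set m " " := by
      simp [pvStepCol, hgd, hv, hbot, -List.getD_eq_getElem?_getD]
    -- take m is untouched
    have htake : (pvStepCol m col).take m = col.take m := by
      rw [hstep, List.take_set, List.take_set,
        List.set_eq_of_length_le (by rw [List.length_set, List.length_take]; omega),
        List.set_eq_of_length_le (by rw [List.length_take]; omega)]
    -- drop m is the packed suffix with col[m] stacked on top of vs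
    have hdropm : (pvStepCol m col).drop m
        = List.replicate (t+1) " " ++ (col[m] :: vs) := by
      rw [hstep, List.drop_set, if_neg (by omega), List.drop_set, if_neg (by omega), hdm]
      have h1 : m + (t + 1) - m = t + 1 := by omega
      have h2 : m - m = 0 := by omega
      rw [h1, h2]
      simp only [List.set_cons_succ, List.set_cons_zero]
      rw [List.set_append, if_pos (by simp)]
      have : (List.replicate (t+1) " ").set t col[m]
          = List.replicate t " " ++ [col[m]] := by
        rw [show (t+1) = t + 1 from rfl, List.replicate_succ' (n := t),
          List.set_append, if_neg (by simp), List.length_replicate]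
        simp
      rw [this]
      simp [List.replicate_succ]
  -- length and filter preserved
    refine ⟨by rw [hstep]; simp, ?_, t+1, col[m] :: vs, hdropm, ?_⟩
    · conv_rhs => rw [← List.take_append_drop m col]
      conv_lhs => rw [← List.take_append_drop m (pvStepCol m col)]
      rw [htake, hdropm, hdm, List.filter_append, List.filter_append]
      simp only [List.filter_append, List.filter_replicate]
      rw [List.filter_cons]
      have hfvs : vs.filter (fun v => v ≠ " ") = vs :=
        List.filter_eq_self.mpr (fun a ha => by simpa using hvs a ha)
      simp [hv, hfvs]
    · intro v hvmem
      rcases List.mem_cons.mp hvmem with h | h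
      · subst h; exact hv
      · exact hvs v h

-- running A's row loop from row m-1 down to 0 on a column whose suffix is already packed
-- packs the whole column
theorem pvPack (m : Nat) (col : List String) (s : Nat) (vs : List String)
    (hdrop : col.drop m = List.replicate s " " ++ vs) (hvs : ∀ v ∈ vs, v ≠ " ") :
    List.foldl (fun col x => pvStepCol x col) col ((List.range m).reverse) =
      List.replicate (col.length - (col.filter (fun v => v ≠ " ")).length) " "
        ++ col.filter (fun v => v ≠ " ") := by
  induction m generalizing col s vs with
  | zero =>
    simp only [List.range_zero, List.reverse_nil, List.foldl_nil]
    rw [List.drop_zero] at hdrop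
    have hfil : col.filter (fun v => v ≠ " ") = vs := by
      rw [hdrop, List.filter_append, List.filter_replicate]
      simpa using hvs
    rw [hfil, hdrop, show (List.replicate s " " ++ vs).length - vs.length = s by simp]
  | succ m ih =>
    rw [List.range_succ, List.reverse_append, List.reverse_singleton,
      List.singleton_append, List.foldl_cons]
    obtain ⟨hlen, hfil, s', vs', hdrop', hvs'⟩ := pvStep_packed m col s vs hdrop hvs
    rw [ih (pvStepCol m col) s' vs' hdrop' hvs', hlen, hfil]

-- the inner loop of A acts on each column independently, by pvStepCol
theorem pvInner (n w x k : Nat) (b : List (List String)) (hb : pvShape n w b)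
    (hx : x < n) (hk : k ≤ w) :
    pvShape n w ((List.range k).foldl (fun b2 i =>
      let v := pvCellA b2 x i
      if v ≠ " " then
        match find_bottom_empty b2 i with
        | some bottom => if x ≤ bottom then pvSetA (pvSetA b2 bottom i v) x i " " else b2
        | none => b2
      else b2) b) ∧
    ∀ c, pvColOf ((List.range k).foldl (fun b2 i =>
      let v := pvCellA b2 x i
      if v ≠ " " then
        match find_bottom_empty b2 i with
        | some bottom => if x ≤ bottom then pvSetA (pvSetA b2 bottom i v) x i " " else b2
        | none => b2
      else b2) b) c = if c < k then pvStepCol x (pvColOf b c) else pvColOf b c := by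
  induction k with
  | zero => exact ⟨hb, fun c => by simp⟩
  | succ k ih =>
    obtain ⟨ihS, ihC⟩ := ih (by omega)
    rw [List.range_succ, List.foldl_append, List.foldl_cons, List.foldl_nil]
    set Bk := (List.range k).foldl (fun b2 i =>
      let v := pvCellA b2 x i
      if v ≠ " " then
        match find_bottom_empty b2 i with
        | some bottom => if x ≤ bottom then pvSetA (pvSetA b2 bottom i v) x i " " else b2
        | none => b2
      else b2) b with hBk
    have hcolk : pvColOf Bk k = pvColOf b k := by rw [ihC k]; simp
    have hv : pvCellA Bk x k = (pvColOf b k).getD x " " := by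
      rw [pvCell_colOf, hcolk]
    have hfind : find_bottom_empty Bk k = pvBottomCol (pvColOf b k) := by
      rw [pvFind_eq, hcolk]
    -- the body leaves Bk unchanged unless it moves a value in column k
    by_cases hvsp : pvCellA Bk x k = " "
    · have hstep : pvStepCol x (pvColOf b k) = pvColOf b k := by
        simp [pvStepCol, ← hv, hvsp, -List.getD_eq_getElem?_getD]
      refine ⟨by simpa [hvsp] using ihS, fun c => ?_⟩
      simp only [hvsp, ne_eq, not_true_eq_false, if_false, ite_false]
      rw [ihC c]
      by_cases hc : c < k + 1
      · by_cases hck : c < k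
        · simp [hc, hck]
        · have : c = k := by omega
          subst this
          simp [hc, hck, hstep, hcolk]
      · simp [hc, show ¬ c < k by omega]
    · cases hbot : find_bottom_empty Bk k with
      | none =>
        have hbot' : pvBottomCol (pvColOf b k) = none := by rw [← hfind, hbot]
        have hstep : pvStepCol x (pvColOf b k) = pvColOf b k := by
          simp [pvStepCol, ← hv, hbot', -List.getD_eq_getElem?_getD]
        refine ⟨by simpa [hvsp, hbot] using ihS, fun c => ?_⟩
        simp only [hvsp, hbot, ne_eq, ite_not, if_true, if_false, ite_true, ite_false]
        rw [ihC c]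
        by_cases hc : c < k + 1
        · by_cases hck : c < k
          · simp [hc, hck]
          · have : c = k := by omega
            subst this
            simp [hc, hck, hstep]
        · simp [hc, show ¬ c < k by omega]
      | some bt =>
        have hbot' : pvBottomCol (pvColOf b k) = some bt := by rw [← hfind, hbot]
        have hbtn : bt < n := by
          have := (pvBottom_lt _ _ hbot').1
          simpa [pvColOf, hb.1] using this
        by_cases hxb : x ≤ bt
        · -- move: board[bt][k] = v; board[x][k] = ' '
          have hstep : pvStepCol x (pvColOf b k)
              = ((pvColOf b k).set bt (pvCellA Bk x k)).set x " " := by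
            simp [pvStepCol, ← hv, hbot', hxb, hvsp, -List.getD_eq_getElem?_getD]
          have hS1 : pvShape n w (pvSetA Bk bt k (pvCellA Bk x k)) :=
            pvShape_set n w Bk bt k _ ihS
          have hS2 : pvShape n w (pvSetA (pvSetA Bk bt k (pvCellA Bk x k)) x k " ") :=
            pvShape_set n w _ x k _ hS1
          refine ⟨by simpa [hvsp, hbot, hxb] using hS2, fun c => ?_⟩
          simp only [hvsp, hbot, hxb, ne_eq, ite_not, if_true, if_false, ite_true, ite_false]
          rw [pvColOf_set _ x k " " (by rw [hS1.1]; omega)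
              (by rw [hS1.2 x hx]; omega) c,
            pvColOf_set Bk bt k _ (by rw [ihS.1]; omega) (by rw [ihS.2 bt hbtn]; omega) c]
          by_cases hck : c = k
          · subst hck
            simp only [if_pos rfl]
            rw [ihC c, if_neg (Nat.lt_irrefl c), hstep]
            simp
          · simp only [if_neg hck]
            rw [ihC c]
            by_cases hc : c < k
            · simp [hc, show c < k + 1 by omega]
            · simp [hc, show ¬ c < k + 1 by omega]
        · have hstep : pvStepCol x (pvColOf b k) = pvColOf b k := by
            simp [pvStepCol, ← hv, hbot', hxb, -List.getD_eq_getElem?_getD]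
          refine ⟨by simpa [hvsp, hbot, hxb] using ihS, fun c => ?_⟩
          simp only [hvsp, hbot, hxb, ne_eq, ite_not, if_true, if_false, ite_true, ite_false]
          rw [ihC c]
          by_cases hc : c < k + 1
          · by_cases hck : c < k
            · simp [hc, hck]
            · have : c = k := by omega
              subst this
              simp [hc, hck, hstep]
          · simp [hc, show ¬ c < k by omega]

theorem pvOuter (n w m : Nat) (b : List (List String)) (hb : pvShape n w b) (hm : m ≤ n) :
    pvShape n w (((List.range m).reverse).foldl (fun b x =>
      (List.range ((b.getD x []).length)).foldl (fun b2 i =>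
        let v := pvCellA b2 x i
        if v ≠ " " then
          match find_bottom_empty b2 i with
          | some bottom => if x ≤ bottom then pvSetA (pvSetA b2 bottom i v) x i " " else b2
          | none => b2
        else b2) b) b) ∧
    ∀ c < w, pvColOf (((List.range m).reverse).foldl (fun b x =>
      (List.range ((b.getD x []).length)).foldl (fun b2 i =>
        let v := pvCellA b2 x i
        if v ≠ " " then
          match find_bottom_empty b2 i with
          | some bottom => if x ≤ bottom then pvSetA (pvSetA b2 bottom i v) x i " " else b2
          | none => b2
        else b2) b) b) c =
      List.foldl (fun col x => pvStepCol x col) (pvColOf b c) ((List.range m).reverse) := by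
  induction m generalizing b with
  | zero => exact ⟨hb, fun c _ => rfl⟩
  | succ m ih =>
    rw [List.range_succ, List.reverse_append, List.reverse_singleton, List.singleton_append,
      List.foldl_cons]
    simp only [List.foldl_cons]
    have hw : (b.getD m []).length = w := hb.2 m (by omega)
    obtain ⟨hS, hC⟩ := pvInner n w m w b hb (by omega) (le_refl w)
    rw [hw]
    obtain ⟨hS', hC'⟩ := ih _ hS (by omega)
    refine ⟨hS', fun c hc => ?_⟩
    rw [hC' c hc, hC c, if_pos hc]

-- ===== VERDICT (by name: the statement is the Claim_ definition above) =====
theorem fill_holes_spec : Claim_equal_fill_holes := by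
  intro board _ hpre
  unfold Spec_fill_holes
  set n := board.length with hn
  set w := (board.headD []).length with hw
  have hshape : pvShape n w board := by
    refine ⟨rfl, fun i hi => ?_⟩
    rw [List.getD_eq_getElem?_getD, List.getElem?_eq_getElem hi]
    exact hpre _ (List.getElem_mem hi)
  obtain ⟨hS, hC⟩ := pvOuter n w n board hshape (le_refl n)
  have hF : fill_holes board = ((List.range n).reverse).foldl (fun b x =>
      (List.range ((b.getD x []).length)).foldl (fun b2 i =>
        let v := pvCellA b2 x i
        if v ≠ " " then
          match find_bottom_empty b2 i with
          | some bottom => if x ≤ bottom then pvSetA (pvSetA b2 bottom i v) x i " " else b2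
          | none => b2
        else b2) b) board := rfl
  rw [← hF] at hS hC
  -- each column of A's result is the packed column
  have hcol : ∀ c < w, pvColOf (fill_holes board) c =
      List.replicate (n - ((pvColOf board c).filter (fun v => v ≠ " ")).length) " "
        ++ (pvColOf board c).filter (fun v => v ≠ " ") := by
    intro c hc
    have hlen : (pvColOf board c).length = n := by rw [hn]; simp [pvColOf]
    rw [hC c hc, pvPack n (pvColOf board c) 0 []
      (by simp [List.drop_eq_nil_of_le (le_of_eq hlen)]) (by simp), hlen]
  -- compare entrywise with B's result
  unfold fill_holes_alt
  rw [← hn, ← hw]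
  apply List.ext_getElem
  · rw [hS.1]; simp
  · intro r h1 h2
    simp only [List.getElem_map, List.getElem_range, List.length_map, List.length_range] at h2 ⊢
    have hr : r < n := by rwa [hS.1] at h1
    apply List.ext_getElem
    · have := hS.2 r hr
      rw [List.getD_eq_getElem?_getD, List.getElem?_eq_getElem h1,
        Option.getD_some] at this
      simp [this]
    · intro c hc1 hc2
      simp only [List.getElem_map, List.getElem_range, List.length_map, List.length_range] at hc2 ⊢
      have hcw : c < w := hc2
      -- left side: the (r, c) entry of A's result, read through its column
      have hL : (fill_holes board)[r][c] = (pvColOf (fill_holes board) c).getD r " " := by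
        rw [← pvCell_colOf]
        unfold pvCellA
        rw [List.getD_eq_getElem?_getD (l := fill_holes board),
          List.getElem?_eq_getElem h1, Option.getD_some,
          List.getD_eq_getElem?_getD, List.getElem?_eq_getElem hc1, Option.getD_some]
      rw [hL, hcol c hcw]
      -- right side: the packed column c, read at row r
      conv_rhs => rw [List.getD_eq_getElem?_getD (l := (List.range w).map _),
        List.getElem?_map, List.getElem?_range hcw]
      simp only [Option.map_some, Option.getD_some]
      rfl
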